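-- pv_equiv track=rewrite | github.com/vikassrivastava18/python-notes | chapter_7.py | skip_first_even
-- ===== SOURCE A (Python) =====
-- def skip_first_even(ls):
--     total = 0
--     count = 0
--     for item in ls:
--         if item % 2 == 0:
--             count += 1
--             if count == 1:
--                 continue
--         total += item
--     return total
-- ===== SOURCE B (Python) =====
-- def skip_first_even(ls):
--     skip = None
--     for i, item in enumerate(ls):
--         if item % 2 == 0:
--             skip = i
--             break
--     return sum(item for i, item in enumerate(ls) if i != skip)
-- ===== Notes on version B (the rewrite author's own statement) =====
-- stated objective: alternative
-- what changed: Replaces A's single fold carrying a running total plus an even-counter with a two-pass find-then-sum: first locate the index of the first even element, then sum every element whose index differs.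
import Mathlib
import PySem

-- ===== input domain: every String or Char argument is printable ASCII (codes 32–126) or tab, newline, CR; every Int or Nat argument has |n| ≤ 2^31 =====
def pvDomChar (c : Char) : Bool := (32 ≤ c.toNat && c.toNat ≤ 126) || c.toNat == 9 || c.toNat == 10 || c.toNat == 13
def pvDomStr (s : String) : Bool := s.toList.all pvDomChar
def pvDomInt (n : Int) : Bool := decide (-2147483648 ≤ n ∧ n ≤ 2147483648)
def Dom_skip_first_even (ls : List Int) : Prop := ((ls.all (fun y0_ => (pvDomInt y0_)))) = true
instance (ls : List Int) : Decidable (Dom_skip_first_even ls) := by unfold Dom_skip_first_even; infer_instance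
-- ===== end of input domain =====

-- B replaces A's single fold (running total + even-counter) with a two-pass find-the-first-even-index then sum-skipping-it; alternative decomposition, same cost.


-- ===== PORT A =====
-- one fold over the list carrying (total, count), exactly A's loop
def skip_first_even (ls : List Int) : Int :=
  (ls.foldl (fun (st : Int × Int) item =>
      if PySem.Int.mod item 2 = 0 then
        if st.2 + 1 = 1 then (st.1, st.2 + 1)
        else (st.1 + item, st.2 + 1)
      else (st.1 + item, st.2)) (0, 0)).1

-- ===== PORT B =====
-- first pass: index of the first even element (enumerate + break), None if absent
def pvFindFirstEven : List Int → Nat → Option Nat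
  | [], _ => none
  | x :: xs, i => if PySem.Int.mod x 2 = 0 then some i else pvFindFirstEven xs (i + 1)

-- second pass: sum(item for i, item in enumerate(ls) if i != skip)
def pvSumSkip : List Int → Nat → Option Nat → Int
  | [], _, _ => 0
  | x :: xs, i, skip => (if skip = some i then 0 else x) + pvSumSkip xs (i + 1) skip

def skip_first_even_alt (ls : List Int) : Int :=
  pvSumSkip ls 0 (pvFindFirstEven ls 0)

-- ===== PRECONDITION & SPEC =====
def Spec_skip_first_even (ls : List Int) (out : Int) : Prop := out = skip_first_even_alt ls
instance (ls : List Int) (out : Int) : Decidable (Spec_skip_first_even ls out) := by unfold Spec_skip_first_even; infer_instance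

-- ===== CLAIM (what is proved, stated in full; the proofs are below) =====
def Claim_equal_skip_first_even : Prop := ∀ (ls : List Int), Dom_skip_first_even ls → Spec_skip_first_even ls (skip_first_even ls)

-- ===== LEMMAS AND PROOFS =====

-- reference value: sum skipping the first even element
def pvSpec : List Int → Int
  | [] => 0
  | x :: xs => if PySem.Int.mod x 2 = 0 then xs.sum else x + pvSpec xs

-- A-side: once count ≥ 1 the fold just sums
theorem pvFoldA_pos (ls : List Int) : ∀ (t c : Int), 0 < c →
    (ls.foldl (fun (st : Int × Int) item =>
      if PySem.Int.mod item 2 = 0 then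
        if st.2 + 1 = 1 then (st.1, st.2 + 1)
        else (st.1 + item, st.2 + 1)
      else (st.1 + item, st.2)) (t, c)).1 = t + ls.sum := by
  induction ls with
  | nil => intro t c _; simp
  | cons x xs ih =>
    intro t c hc
    by_cases h : PySem.Int.mod x 2 = 0
    · have hc1 : ¬ (c + 1 = 1) := by omega
      rw [List.foldl_cons, if_pos h, if_neg hc1]
      rw [ih (t + x) (c + 1) (by omega), List.sum_cons]; ring
    · rw [List.foldl_cons, if_neg h]
      rw [ih (t + x) c hc, List.sum_cons]; ring

theorem pvFoldA_zero (ls : List Int) : ∀ (t : Int),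
    (ls.foldl (fun (st : Int × Int) item =>
      if PySem.Int.mod item 2 = 0 then
        if st.2 + 1 = 1 then (st.1, st.2 + 1)
        else (st.1 + item, st.2 + 1)
      else (st.1 + item, st.2)) (t, 0)).1 = t + pvSpec ls := by
  induction ls with
  | nil => intro t; simp [pvSpec]
  | cons x xs ih =>
    intro t
    by_cases h : PySem.Int.mod x 2 = 0
    · rw [List.foldl_cons, if_pos h, if_pos (show (0 : Int) + 1 = 1 by omega), pvSpec]
      rw [if_pos h, pvFoldA_pos xs t (0 + 1) (by omega)]
    · rw [List.foldl_cons, if_neg h, pvSpec, if_neg h]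
      rw [ih (t + x)]; ring

-- B-side: the skip index never matches beyond the scanned range
theorem pvFind_ge (ls : List Int) : ∀ (i j : Nat), pvFindFirstEven ls i = some j → i ≤ j := by
  induction ls with
  | nil => intro i j h; simp [pvFindFirstEven] at h
  | cons x xs ih =>
    intro i j h
    by_cases hx : PySem.Int.mod x 2 = 0
    · rw [pvFindFirstEven, if_pos hx] at h
      injection h with h; omega
    · rw [pvFindFirstEven, if_neg hx] at h
      have := ih (i + 1) j h; omega

theorem pvSumSkip_miss (ls : List Int) : ∀ (i : Nat) (skip : Option Nat),
    (∀ j, skip = some j → j < i) → pvSumSkip ls i skip = ls.sum := by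
  induction ls with
  | nil => intro i skip _; simp [pvSumSkip]
  | cons x xs ih =>
    intro i skip h
    have hne : ¬ (skip = some i) := fun he => absurd (h i he) (by omega)
    simp only [pvSumSkip, if_neg hne, List.sum_cons]
    rw [ih (i + 1) skip (fun j hj => by have := h j hj; omega)]

theorem pvB_spec (ls : List Int) : ∀ (i : Nat), pvSumSkip ls i (pvFindFirstEven ls i) = pvSpec ls := by
  induction ls with
  | nil => intro i; simp [pvSumSkip, pvSpec]
  | cons x xs ih =>
    intro i
    by_cases hx : PySem.Int.mod x 2 = 0
    · rw [pvFindFirstEven, if_pos hx, pvSumSkip, if_pos rfl, pvSpec, if_pos hx]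
      rw [pvSumSkip_miss xs (i + 1) (some i) (fun j hj => by injection hj with h; omega)]
      ring
    · rw [pvFindFirstEven, if_neg hx, pvSumSkip, pvSpec, if_neg hx]
      have hne : ¬ (pvFindFirstEven xs (i + 1) = some i) := by
        intro h; have := pvFind_ge xs (i + 1) i h; omega
      rw [if_neg hne, ih (i + 1)]

-- ===== VERDICT (by name: the statement is the Claim_ definition above) =====
theorem skip_first_even_spec : Claim_equal_skip_first_even := by
  intro ls _
  unfold Spec_skip_first_even skip_first_even skip_first_even_alt
  rw [pvFoldA_zero ls 0, pvB_spec ls 0]; ring
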